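-- pv_equiv track=rewrite | github.com/denyid/vkr | core/portscanner.py | parse_ports_from_string
-- ===== SOURCE A (Python) =====
-- def parse_ports_from_string(s):
--     """
--     Парсит строку вида "22,80,1000-1010" → список уникальных портов (ints).
--     Возвращает пустой список при ошибке/пустой строке.
--     """
--     if not s:
--         return []
--     out = set()
--     parts = s.split(",")
--     for part in parts:
--         part = part.strip()
--         if not part:
--             continue
--         if "-" in part:
--             try:
--                 start, end = part.split("-", 1)
--                 start = int(start.strip())
--                 end = int(end.strip())
--                 if end < start:
--                     start, end = end, start
--                 for p in range(start, end + 1):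
--                     if 1 <= p <= 65535:
--                         out.add(p)
--             except ValueError:
--                 continue
--         else:
--             try:
--                 p = int(part)
--                 if 1 <= p <= 65535:
--                     out.add(p)
--             except ValueError:
--                 continue
--     return sorted(out)
-- ===== SOURCE B (Python) =====
-- def parse_ports_from_string(s):
--     """Interval-based rewrite: collect clamped (lo, hi) intervals, sort by start,
--     then emit each range once past the last emitted port (no set, no per-port filter)."""
--     if not s:
--         return []
--     intervals = []
--     for tok in s.split(","):
--         tok = tok.strip()
--         if not tok:
--             continue
--         if "-" in tok:
--             a, b = tok.split("-", 1)
--             try: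
--                 lo = int(a.strip())
--                 hi = int(b.strip())
--             except ValueError:
--                 continue
--             if hi < lo:
--                 lo, hi = hi, lo
--             lo = max(lo, 1)
--             hi = min(hi, 65535)
--             if lo <= hi:
--                 intervals.append((lo, hi))
--         else:
--             try:
--                 p = int(tok)
--             except ValueError:
--                 continue
--             if 1 <= p <= 65535:
--                 intervals.append((p, p))
--     intervals.sort(key=lambda iv: iv[0])
--     result = []
--     last = 0
--     for lo, hi in intervals:
--         start = max(lo, last + 1)
--         if start <= hi:
--             result.extend(range(start, hi + 1))
--             last = hi
--     return result
-- ===== Notes on version B (the rewrite author's own statement) =====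
-- stated objective: alternative
-- what changed: B collects each token as one clamped (lo,hi) interval, sorts the interval list by start and emits each interval's range once past the last produced port, instead of A's per-port set insertion with a per-element bounds test followed by sorted(); overlapping or out-of-range spans are skipped wholesale rather than filtered port by port.
import Mathlib
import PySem

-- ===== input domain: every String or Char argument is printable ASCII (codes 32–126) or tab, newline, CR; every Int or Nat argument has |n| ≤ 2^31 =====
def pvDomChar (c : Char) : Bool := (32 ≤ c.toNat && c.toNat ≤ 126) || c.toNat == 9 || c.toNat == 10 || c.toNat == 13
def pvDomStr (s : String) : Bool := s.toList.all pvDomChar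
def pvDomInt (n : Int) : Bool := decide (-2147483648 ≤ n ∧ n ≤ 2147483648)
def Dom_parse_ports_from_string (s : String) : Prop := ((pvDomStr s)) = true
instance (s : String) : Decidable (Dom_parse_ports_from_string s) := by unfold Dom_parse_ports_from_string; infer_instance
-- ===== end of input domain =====

-- B replaces A's per-port set insertion with clamped (lo,hi) intervals, sorted by start and
-- emitted past the last produced port; same return value, proved below.

-- ===== PORT A =====
-- A's inner loop: 'for p in range(start, end+1): if 1 <= p <= 65535: out.add(p)'
def pvAddRange (out : PySem.Set Int) (st en : Int) : PySem.Set Int :=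
  (PySem.List.pyRange st (en + 1) 1).foldl
    (fun o p => if 1 ≤ p ∧ p ≤ 65535 then PySem.Set.add o p else o) out

-- one comma token of A's loop body
def pvStepA (out : PySem.Set Int) (part0 : String) : PySem.Set Int :=
  if (PySem.Str.strip part0).toList = [] then out
  else if PySem.Str.isIn "-" (PySem.Str.strip part0) then
    match PySem.Str.splitMax? (PySem.Str.strip part0) "-" 1 with
    | some [st, en] =>
      match PySem.Int.ofStr? (PySem.Str.strip st), PySem.Int.ofStr? (PySem.Str.strip en) with
      | some a, some b =>
        pvAddRange out (if b < a then b else a) (if b < a then a else b)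
      | _, _ => out  -- int() raised ValueError → continue
    | _ => out  -- unreachable ('-' is in the token, maxsplit=1 gives two pieces)
  else
    match PySem.Int.ofStr? (PySem.Str.strip part0) with
    | some p => if 1 ≤ p ∧ p ≤ 65535 then PySem.Set.add out p else out
    | none => out

def parse_ports_from_string (s : String) : List Int :=
  if s.toList = [] then []
  else
    PySem.List.sorted
      (((PySem.Str.split? s ",").getD []).foldl pvStepA PySem.Set.empty)  -- split? is some: sep ≠ ""
      (fun x => x) false

-- ===== PORT B =====
-- one comma token of B's loop body: append the clamped interval (or (p,p)), skip bad tokens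
def pvStepB (ivs : List (Int × Int)) (part0 : String) : List (Int × Int) :=
  if (PySem.Str.strip part0).toList = [] then ivs
  else if PySem.Str.isIn "-" (PySem.Str.strip part0) then
    match PySem.Str.splitMax? (PySem.Str.strip part0) "-" 1 with
    | some [a, b] =>
      match PySem.Int.ofStr? (PySem.Str.strip a), PySem.Int.ofStr? (PySem.Str.strip b) with
      | some lo0, some hi0 =>
        if max (if hi0 < lo0 then hi0 else lo0) 1 ≤ min (if hi0 < lo0 then lo0 else hi0) 65535
        then ivs ++ [(max (if hi0 < lo0 then hi0 else lo0) 1,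
                      min (if hi0 < lo0 then lo0 else hi0) 65535)]
        else ivs
      | _, _ => ivs
    | _ => ivs
  else
    match PySem.Int.ofStr? (PySem.Str.strip part0) with
    | some p => if 1 ≤ p ∧ p ≤ 65535 then ivs ++ [(p, p)] else ivs
    | none => ivs

-- B's emission loop: state = (result, last emitted port; 0 before any)
def pvEmit (st : List Int × Int) (iv : Int × Int) : List Int × Int :=
  if max iv.1 (st.2 + 1) ≤ iv.2
  then (st.1 ++ PySem.List.pyRange (max iv.1 (st.2 + 1)) (iv.2 + 1) 1, iv.2)
  else st

def parse_ports_from_string_alt (s : String) : List Int :=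
  if s.toList = [] then []
  else
    ((PySem.List.sorted (((PySem.Str.split? s ",").getD []).foldl pvStepB [])
        (fun iv => iv.1) false).foldl pvEmit ([], 0)).1

-- ===== PRECONDITION & SPEC =====
def Spec_parse_ports_from_string (s : String) (out : List Int) : Prop := out = parse_ports_from_string_alt s
instance (s : String) (out : List Int) : Decidable (Spec_parse_ports_from_string s out) := by unfold Spec_parse_ports_from_string; infer_instance

-- ===== CLAIM (what is proved, stated in full; the proofs are below) =====
def Claim_equal_parse_ports_from_string : Prop := ∀ (s : String), Dom_parse_ports_from_string s → Spec_parse_ports_from_string s (parse_ports_from_string s)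

-- ===== LEMMAS AND PROOFS =====

-- a foldl preserves any property its step preserves
theorem pv_foldl_pres {α : Type} {β : Type} (P : α → Prop) (f : α → β → α)
    (hf : ∀ a b, P a → P (f a b)) : ∀ (l : List β) (a : α), P a → P (l.foldl f a)
  | [], _, h => h
  | b :: l, a, h => pv_foldl_pres P f hf l (f a b) (hf a b h)

-- membership in A's clamped-range insertion loop
theorem pv_mem_addRange (st en : Int) (out : PySem.Set Int) (y : Int) :
    y ∈ pvAddRange out st en ↔ y ∈ out ∨ (st ≤ y ∧ y ≤ en ∧ 1 ≤ y ∧ y ≤ 65535) := by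
  unfold pvAddRange
  have h : ∀ (l : List Int) (o : PySem.Set Int),
      y ∈ l.foldl (fun o p => if 1 ≤ p ∧ p ≤ 65535 then PySem.Set.add o p else o) o ↔
        y ∈ o ∨ (y ∈ l ∧ 1 ≤ y ∧ y ≤ 65535) := by
    intro l
    induction l with
    | nil => simp
    | cons x xs ih =>
      intro o
      simp only [List.foldl_cons, ih, List.mem_cons]
      split_ifs with hx
      · rw [PySem.Set.mem_add]
        constructor
        · rintro ((h1 | rfl) | ⟨h1, h2⟩)
          · exact Or.inl h1
          · exact Or.inr ⟨Or.inl rfl, hx⟩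
          · exact Or.inr ⟨Or.inr h1, h2⟩
        · rintro (h1 | ⟨rfl | h1, h2⟩)
          · exact Or.inl (Or.inl h1)
          · exact Or.inl (Or.inr rfl)
          · exact Or.inr ⟨h1, h2⟩
      · constructor
        · rintro (h1 | ⟨h1, h2⟩)
          · exact Or.inl h1
          · exact Or.inr ⟨Or.inr h1, h2⟩
        · rintro (h1 | ⟨rfl | h1, h2⟩)
          · exact Or.inl h1
          · exact absurd h2 hx
          · exact Or.inr ⟨h1, h2⟩
  rw [h]
  simp only [PySem.List.mem_pyRange_one]
  by_cases hout : y ∈ out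
  · simp [hout]
  · simp only [hout, false_or]
    omega

-- A's step preserves Nodup of the accumulated set
theorem pv_nodup_stepA (out : PySem.Set Int) (part : String) (h : out.Nodup) :
    (pvStepA out part).Nodup := by
  have hrange : ∀ (st en : Int), (pvAddRange out st en).Nodup := by
    intro st en
    unfold pvAddRange
    refine pv_foldl_pres _ _ ?_ _ _ h
    intro o p ho
    split_ifs with hp
    · rw [PySem.Set.add_eq_ite]
      split_ifs with hm
      · exact ho
      · simpa [List.Nodup] using List.Nodup.append ho (List.nodup_singleton p)
          (by simpa [List.disjoint_singleton] using hm)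
    · exact ho
  unfold pvStepA
  split_ifs
  · exact h
  · split
    · split
      · exact hrange _ _
      · exact h
    · exact h
  · split
    · split_ifs with hp
      · rw [PySem.Set.add_eq_ite]
        split_ifs with hm
        · exact h
        · simpa [List.Nodup] using List.Nodup.append h (List.nodup_singleton _)
            (by simpa [List.disjoint_singleton] using hm)
      · exact h
    · exact h

-- per-token agreement: what A's step adds to the set is exactly what B's new interval covers
theorem pv_step_mem (out : PySem.Set Int) (part : String) (y : Int) :
    y ∈ pvStepA out part ↔ y ∈ out ∨ ∃ iv ∈ pvStepB [] part, iv.1 ≤ y ∧ y ≤ iv.2 := by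
  -- the two ports branch on syntactically identical scrutinees, so the cases align
  unfold pvStepA pvStepB
  by_cases h1 : (PySem.Str.strip part).toList = []
  · simp only [if_pos h1]
    simp
  · simp only [if_neg h1]
    by_cases h2 : PySem.Str.isIn "-" (PySem.Str.strip part) = true
    · simp only [if_pos h2]
      rcases hsp : PySem.Str.splitMax? (PySem.Str.strip part) "-" 1 with _ | l
      · simp
      · rcases l with _ | ⟨a, _ | ⟨b, _ | ⟨c, rest⟩⟩⟩
        · simp
        · simp
        · rcases ha : PySem.Int.ofStr? (PySem.Str.strip a) with _ | av
          · simp only [ha]; simp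
          · rcases hb : PySem.Int.ofStr? (PySem.Str.strip b) with _ | bv
            · simp only [ha, hb]; simp
            · simp only [ha, hb]
              rw [pv_mem_addRange]
              by_cases hout : y ∈ out
              · simp [hout]
              · simp only [hout, false_or]
                split_ifs <;> simp <;> omega
        · simp
    · simp only [if_neg h2]
      rcases hp : PySem.Int.ofStr? (PySem.Str.strip part) with _ | p
      · simp
      · simp only [List.nil_append]
        by_cases hout : y ∈ out
        · split_ifs <;> simp [hout, PySem.Set.mem_add]
        · split_ifs with hc
          · rw [PySem.Set.mem_add]
            simp only [hout, false_or, List.mem_singleton]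
            constructor
            · rintro rfl
              exact ⟨(y, y), rfl, le_refl _, le_refl _⟩
            · rintro ⟨iv, rfl, hy1, hy2⟩
              simp only at hy1 hy2
              omega
          · simp [hout]

-- B's step only appends to the interval list
theorem pv_stepB_nil (ivs : List (Int × Int)) (part : String) :
    pvStepB ivs part = ivs ++ pvStepB [] part := by
  unfold pvStepB
  by_cases h1 : (PySem.Str.strip part).toList = []
  · simp only [if_pos h1]; simp
  · simp only [if_neg h1]
    by_cases h2 : PySem.Str.isIn "-" (PySem.Str.strip part) = true
    · simp only [if_pos h2]
      rcases hsp : PySem.Str.splitMax? (PySem.Str.strip part) "-" 1 with _ | l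
      · simp
      · rcases l with _ | ⟨a, _ | ⟨b, _ | ⟨c, rest⟩⟩⟩
        · simp
        · simp
        · rcases ha : PySem.Int.ofStr? (PySem.Str.strip a) with _ | av
          · simp only [ha]; simp
          · rcases hb : PySem.Int.ofStr? (PySem.Str.strip b) with _ | bv
            · simp only [ha, hb]; simp
            · simp only [ha, hb]
              split_ifs <;> simp
        · simp
    · simp only [if_neg h2]
      rcases hp : PySem.Int.ofStr? (PySem.Str.strip part) with _ | p
      · simp
      · simp only []
        split_ifs <;> simp

-- B's interval collection is the per-token contributions, in token order
theorem pv_foldl_flat (parts : List String) :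
    ∀ ivs, parts.foldl pvStepB ivs = ivs ++ parts.flatMap (fun p => pvStepB [] p) := by
  induction parts with
  | nil => intro ivs; simp
  | cons p ps ih =>
    intro ivs
    simp only [List.foldl_cons, List.flatMap_cons, ih, pv_stepB_nil ivs p, List.append_assoc]

-- membership in A's accumulated set, in terms of B's per-token intervals
theorem pv_foldl_memA (parts : List String) :
    ∀ (out : PySem.Set Int) (y : Int), y ∈ parts.foldl pvStepA out ↔
      y ∈ out ∨ ∃ p ∈ parts, ∃ iv ∈ pvStepB [] p, iv.1 ≤ y ∧ y ≤ iv.2 := by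
  induction parts with
  | nil => intro out y; simp
  | cons p ps ih =>
    intro out y
    simp only [List.foldl_cons, ih, pv_step_mem, List.mem_cons]
    constructor
    · rintro ((h | h) | ⟨q, hq, hiv⟩)
      · exact Or.inl h
      · exact Or.inr ⟨p, Or.inl rfl, h⟩
      · exact Or.inr ⟨q, Or.inr hq, hiv⟩
    · rintro (h | ⟨q, rfl | hq, hiv⟩)
      · exact Or.inl (Or.inl h)
      · exact Or.inl (Or.inr hiv)
      · exact Or.inr ⟨q, hq, hiv⟩

-- every interval B appends is valid: 1 ≤ lo ≤ hi
theorem pv_stepB_valid (ivs : List (Int × Int)) (part : String)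
    (h : ∀ iv ∈ ivs, 1 ≤ iv.1 ∧ iv.1 ≤ iv.2) :
    ∀ iv ∈ pvStepB ivs part, 1 ≤ iv.1 ∧ iv.1 ≤ iv.2 := by
  have happ : ∀ (lo hi : Int), 1 ≤ lo → lo ≤ hi →
      ∀ iv ∈ ivs ++ [(lo, hi)], 1 ≤ iv.1 ∧ iv.1 ≤ iv.2 := by
    intro lo hi hlo hlh iv hiv
    rcases List.mem_append.mp hiv with hm | hm
    · exact h iv hm
    · simp only [List.mem_singleton] at hm
      subst hm
      exact ⟨hlo, hlh⟩
  unfold pvStepB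
  by_cases h1 : (PySem.Str.strip part).toList = []
  · simp only [if_pos h1]; exact h
  · simp only [if_neg h1]
    by_cases h2 : PySem.Str.isIn "-" (PySem.Str.strip part) = true
    · simp only [if_pos h2]
      rcases hsp : PySem.Str.splitMax? (PySem.Str.strip part) "-" 1 with _ | l
      · exact h
      · rcases l with _ | ⟨a, _ | ⟨b, _ | ⟨c, rest⟩⟩⟩
        · exact h
        · exact h
        · rcases ha : PySem.Int.ofStr? (PySem.Str.strip a) with _ | av
          · simp only [ha]; exact h
          · rcases hb : PySem.Int.ofStr? (PySem.Str.strip b) with _ | bv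
            · simp only [ha, hb]; exact h
            · simp only [ha, hb]
              split_ifs <;>
                first
                | exact h
                | exact happ _ _ (le_max_right _ _) (by assumption)
        · exact h
    · simp only [if_neg h2]
      rcases hp : PySem.Int.ofStr? (PySem.Str.strip part) with _ | p
      · exact h
      · simp only []
        split_ifs with hc
        · exact happ _ _ hc.1 (le_refl _)
        · exact h

-- the emission fold: strictly increasing output covering exactly the intervals' ports
theorem pv_emit_spec (ivs : List (Int × Int)) :
    ∀ (acc : List Int) (last : Int),
    (∀ iv ∈ ivs, 1 ≤ iv.1 ∧ iv.1 ≤ iv.2) →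
    ivs.Pairwise (fun p q => p.1 ≤ q.1) →
    acc.Pairwise (· < ·) →
    (∀ y ∈ acc, y ≤ last) →
    (∀ iv ∈ ivs, ∀ x, iv.1 ≤ x → x ≤ last → x ∈ acc) →
    (ivs.foldl pvEmit (acc, last)).1.Pairwise (· < ·) ∧
      (∀ y, y ∈ (ivs.foldl pvEmit (acc, last)).1 ↔
        y ∈ acc ∨ ∃ iv ∈ ivs, iv.1 ≤ y ∧ y ≤ iv.2) := by
  induction ivs with
  | nil =>
    intro acc last _ _ hacc _ _
    exact ⟨hacc, by simp⟩
  | cons iv rest ih =>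
    intro acc last hvalid hsorted hacc hle hcov
    obtain ⟨lo, hi⟩ := iv
    have hv : 1 ≤ lo ∧ lo ≤ hi := hvalid (lo, hi) (List.mem_cons_self)
    have hrest_lo : ∀ q ∈ rest, lo ≤ q.1 := by
      intro q hq
      exact (List.pairwise_cons.mp hsorted).1 q hq
    have hcov_head : ∀ x, lo ≤ x → x ≤ last → x ∈ acc :=
      hcov (lo, hi) (List.mem_cons_self) 
    simp only [List.foldl_cons]
    by_cases hc : max lo (last + 1) ≤ hi
    · rw [show pvEmit (acc, last) (lo, hi)
          = (acc ++ PySem.List.pyRange (max lo (last + 1)) (hi + 1) 1, hi) by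
        unfold pvEmit; simp [hc]]
      have hmemr : ∀ z, z ∈ PySem.List.pyRange (max lo (last + 1)) (hi + 1) 1 ↔
          max lo (last + 1) ≤ z ∧ z < hi + 1 := fun z => PySem.List.mem_pyRange_one
      have hacc' : (acc ++ PySem.List.pyRange (max lo (last + 1)) (hi + 1) 1).Pairwise (· < ·) := by
        rw [List.pairwise_append]
        refine ⟨hacc, PySem.List.pairwise_lt_pyRange_one _ _, ?_⟩
        intro x hx z hz
        rw [hmemr] at hz
        have := hle x hx
        omega
      have hle' : ∀ y ∈ acc ++ PySem.List.pyRange (max lo (last + 1)) (hi + 1) 1, y ≤ hi := by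
        intro y hy
        rcases List.mem_append.mp hy with hy | hy
        · have := hle y hy; omega
        · rw [hmemr] at hy; omega
      have hcov' : ∀ q ∈ rest, ∀ x, q.1 ≤ x → x ≤ hi →
          x ∈ acc ++ PySem.List.pyRange (max lo (last + 1)) (hi + 1) 1 := by
        intro q hq x hx1 hx2
        by_cases hge : max lo (last + 1) ≤ x
        · exact List.mem_append.mpr (Or.inr ((hmemr x).mpr ⟨hge, by omega⟩))
        · have hql : lo ≤ q.1 := hrest_lo q hq
          exact List.mem_append.mpr (Or.inl (hcov_head x (by omega) (by omega)))
      obtain ⟨hp, hm⟩ := ih _ hi (fun q hq => hvalid q (List.mem_cons_of_mem _ hq))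
        (List.pairwise_cons.mp hsorted).2 hacc' hle' hcov'
      refine ⟨hp, ?_⟩
      intro y
      rw [hm y]
      simp only [List.mem_append, hmemr, List.mem_cons]
      constructor
      · rintro ((hy | hy) | ⟨q, hq, hy⟩)
        · exact Or.inl hy
        · exact Or.inr ⟨(lo, hi), Or.inl rfl, by simp; omega⟩
        · exact Or.inr ⟨q, Or.inr hq, hy⟩
      · rintro (hy | ⟨q, rfl | hq, hy⟩)
        · exact Or.inl (Or.inl hy)
        · simp only at hy
          by_cases hge : max lo (last + 1) ≤ y
          · exact Or.inl (Or.inr ⟨hge, by omega⟩)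
          · exact Or.inl (Or.inl (hcov_head y (by omega) (by omega)))
        · exact Or.inr ⟨q, hq, hy⟩
    · rw [show pvEmit (acc, last) (lo, hi) = (acc, last) by unfold pvEmit; simp [hc]]
      obtain ⟨hp, hm⟩ := ih acc last (fun q hq => hvalid q (List.mem_cons_of_mem _ hq))
        (List.pairwise_cons.mp hsorted).2 hacc hle
        (fun q hq => hcov q (List.mem_cons_of_mem _ hq))
      refine ⟨hp, ?_⟩
      intro y
      rw [hm y]
      simp only [List.mem_cons]
      constructor
      · rintro (hy | ⟨q, hq, hy⟩)
        · exact Or.inl hy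
        · exact Or.inr ⟨q, Or.inr hq, hy⟩
      · rintro (hy | ⟨q, rfl | hq, hy⟩)
        · exact Or.inl hy
        · simp only at hy
          exact Or.inl (hcov_head y hy.1 (by omega))
        · exact Or.inr ⟨q, hq, hy⟩

-- ===== VERDICT (by name: the statement is the Claim_ definition above) =====
theorem parse_ports_from_string_spec : Claim_equal_parse_ports_from_string := by
  intro s _
  unfold Spec_parse_ports_from_string parse_ports_from_string parse_ports_from_string_alt
  by_cases hs : s.toList = []
  · simp [hs]
  · simp only [hs, if_false]
    -- names for the two accumulations
    set parts := (PySem.Str.split? s ",").getD [] with hparts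
    set setlist := parts.foldl pvStepA PySem.Set.empty with hset
    set ivs := parts.foldl pvStepB [] with hivs
    set sortedIvs := PySem.List.sorted ivs (fun iv => iv.1) false with hsrt
    -- facts about B's interval list
    have hvalid : ∀ iv ∈ sortedIvs, 1 ≤ iv.1 ∧ iv.1 ≤ iv.2 := by
      intro iv hiv
      rw [PySem.List.mem_sorted] at hiv
      revert iv hiv
      exact pv_foldl_pres (fun l => ∀ iv ∈ l, 1 ≤ iv.1 ∧ iv.1 ≤ iv.2)
        pvStepB (fun l p hl => pv_stepB_valid l p hl) parts [] (by simp)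
    have hsorted : sortedIvs.Pairwise (fun p q => p.1 ≤ q.1) := PySem.List.sorted_pairwise _ _
    -- the emission result
    obtain ⟨hpw, hmem⟩ := pv_emit_spec sortedIvs [] 0 hvalid hsorted (by simp) (by simp)
      (by intro iv hiv x hx1 hx2
          have := hvalid iv hiv
          omega)
    -- A's set: nodup and same membership
    have hnodup : setlist.Nodup := by
      rw [hset]
      exact pv_foldl_pres (fun o : PySem.Set Int => o.Nodup) pvStepA
        (fun o p ho => pv_nodup_stepA o p ho) parts PySem.Set.empty List.nodup_nil
    have hsame : ∀ y, y ∈ (sortedIvs.foldl pvEmit ([], 0)).1 ↔ y ∈ setlist := by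
      intro y
      rw [hmem y, hset, pv_foldl_memA parts PySem.Set.empty y]
      simp only [PySem.Set.empty]  -- membership in the empty set is False
      constructor
      · rintro (hy | ⟨iv, hiv, hy⟩)
        · simp at hy
        · rw [hsrt, PySem.List.mem_sorted, hivs, pv_foldl_flat parts [], List.nil_append,
            List.mem_flatMap] at hiv
          obtain ⟨p, hp, hivp⟩ := hiv
          exact Or.inr ⟨p, hp, iv, hivp, hy⟩
      · rintro (hy | ⟨p, hp, iv, hivp, hy⟩)
        · simp at hy
        · refine Or.inr ⟨iv, ?_, hy⟩
          rw [hsrt, PySem.List.mem_sorted, hivs, pv_foldl_flat parts [], List.nil_append,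
            List.mem_flatMap]
          exact ⟨p, hp, hivp⟩
    -- strictly increasing + same members ⇒ it IS sorted(set)
    have hnd2 : (sortedIvs.foldl pvEmit ([], 0)).1.Nodup := hpw.imp (fun h => ne_of_lt h)
    have hperm : (sortedIvs.foldl pvEmit ([], 0)).1.Perm setlist :=
      (List.perm_ext_iff_of_nodup hnd2 hnodup).mpr hsame
    exact PySem.List.sorted_eq_of_perm_of_pairwise_lt _ _ _ hperm hpw
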